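-- pv_equiv track=rewrite | github.com/sfilges/plexus | multiplexdesigner/designer/primer3_port.py | calc_thermodynamics
-- ===== SOURCE A (Python) =====
-- DS_PARAMS = {
--     'AA': 222, 'AC': 224, 'AG': 210, 'AT': 204, 'AN': 224,
--     'CA': 227, 'CC': 199, 'CG': 272, 'CT': 210, 'CN': 272,
--     'GA': 222, 'GC': 244, 'GG': 199, 'GT': 224, 'GN': 244,
--     'TA': 213, 'TC': 222, 'TG': 227, 'TT': 222, 'TN': 227,
--     'NA': 168, 'NC': 210, 'NG': 220, 'NT': 215, 'NN': 220
-- }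
--
-- DH_PARAMS = {
--     'AA': 79, 'AC': 84, 'AG': 78, 'AT': 72, 'AN': 72,
--     'CA': 85, 'CC': 80, 'CG': 106, 'CT': 78, 'CN': 78,
--     'GA': 82, 'GC': 98, 'GG': 80, 'GT': 84, 'GN': 80,
--     'TA': 72, 'TC': 82, 'TG': 85, 'TT': 79, 'TN': 72,
--     'NA': 72, 'NC': 80, 'NG': 78, 'NT': 72, 'NN': 72
-- }
--
-- def calc_thermodynamics(seq: str) -> tuple:
--     """
--     Calculate enthalpy (dh) and entropy (ds) for sequence using SantaLucia (1998) parameters.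
--
--     Args:
--         seq - Sequence to analyze
--     """
--     dh = 0
--     ds = 0
--
--     # Select parameter tables
--     h_table = DH_PARAMS
--     s_table = DS_PARAMS
--
--     # Symmetry correction
--     if symmetry(seq):
--         ds += 14
--
--     # Terminal AT penalty
--     if seq[0] in 'AT':
--         ds += -41
--         dh += -23
--     elif seq[0] in 'CG':
--         ds += 28
--         dh += -1
--
--     if seq[-1] in 'AT':
--         ds += -41
--         dh += -23
--     elif seq[-1] in 'CG':
--         ds += 28
--         dh += -1
--
--     # Calculate nearest-neighbor contributions
--     for i in range(len(seq) - 1):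
--         pair = seq[i:i+2]
--         dh += h_table.get(pair, h_table['NN'])
--         ds += s_table.get(pair, s_table['NN'])
--
--     return dh, ds
--
-- def symmetry(seq: str) -> bool:
--     """Check if sequence is self-complementary/symmetrical."""
--     seq_len = len(seq)
--     if seq_len % 2 == 1:
--         return False
--
--     complement = {'A': 'T', 'T': 'A', 'C': 'G', 'G': 'C'}
--     mid = seq_len // 2
--
--     for i in range(mid):
--         if seq[i] not in complement or seq[-(i+1)] != complement[seq[i]]:
--             return False
--
--     return True
-- ===== SOURCE B (Python) =====
-- DS_PARAMS = {
--     'AA': 222, 'AC': 224, 'AG': 210, 'AT': 204, 'AN': 224,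
--     'CA': 227, 'CC': 199, 'CG': 272, 'CT': 210, 'CN': 272,
--     'GA': 222, 'GC': 244, 'GG': 199, 'GT': 224, 'GN': 244,
--     'TA': 213, 'TC': 222, 'TG': 227, 'TT': 222, 'TN': 227,
--     'NA': 168, 'NC': 210, 'NG': 220, 'NT': 215, 'NN': 220
-- }
--
-- DH_PARAMS = {
--     'AA': 79, 'AC': 84, 'AG': 78, 'AT': 72, 'AN': 72,
--     'CA': 85, 'CC': 80, 'CG': 106, 'CT': 78, 'CN': 78,
--     'GA': 82, 'GC': 98, 'GG': 80, 'GT': 84, 'GN': 80,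
--     'TA': 72, 'TC': 82, 'TG': 85, 'TT': 79, 'TN': 72,
--     'NA': 72, 'NC': 80, 'NG': 78, 'NT': 72, 'NN': 72
-- }
--
-- COMPLEMENT = {'A': 'T', 'T': 'A', 'C': 'G', 'G': 'C'}
--
-- TERMINAL = {'A': (-23, -41), 'T': (-23, -41), 'C': (-1, 28), 'G': (-1, 28)}
--
--
-- def calc_thermodynamics(seq: str) -> tuple:
--     # Build a dinucleotide frequency table once, then aggregate count * parameter.
--     counts = {}
--     for pair in zip(seq, seq[1:]):
--         counts[pair] = counts.get(pair, 0) + 1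
--     dh = 0
--     ds = 0
--     for (a, b), n in counts.items():
--         dh += n * DH_PARAMS.get(a + b, 72)
--         ds += n * DS_PARAMS.get(a + b, 220)
--     # Terminal penalties for both ends (IndexError on empty seq, as in the original).
--     for c in (seq[0], seq[-1]):
--         h, s = TERMINAL.get(c, (0, 0))
--         dh += h
--         ds += s
--     # Symmetry correction: seq is its own reverse complement.
--     if len(seq) % 2 == 0 and all(c in COMPLEMENT for c in seq) \
--             and seq == ''.join(COMPLEMENT[c] for c in reversed(seq)):
--         ds += 14
--     return dh, ds
-- ===== Notes on version B (the rewrite author's own statement) =====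
-- stated objective: faster
-- what changed: B builds a dinucleotide frequency table once and aggregates count*parameter over its distinct pairs instead of A's two dict lookups and string-slice per position, replaces the terminal if/elif chains with a TERMINAL lookup table, and recasts the symmetry half-scan as comparing seq to its reverse complement.
-- outside the precondition, e.g. on calc_thermodynamics(''): A raises IndexError, B raises IndexError
import Mathlib
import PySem

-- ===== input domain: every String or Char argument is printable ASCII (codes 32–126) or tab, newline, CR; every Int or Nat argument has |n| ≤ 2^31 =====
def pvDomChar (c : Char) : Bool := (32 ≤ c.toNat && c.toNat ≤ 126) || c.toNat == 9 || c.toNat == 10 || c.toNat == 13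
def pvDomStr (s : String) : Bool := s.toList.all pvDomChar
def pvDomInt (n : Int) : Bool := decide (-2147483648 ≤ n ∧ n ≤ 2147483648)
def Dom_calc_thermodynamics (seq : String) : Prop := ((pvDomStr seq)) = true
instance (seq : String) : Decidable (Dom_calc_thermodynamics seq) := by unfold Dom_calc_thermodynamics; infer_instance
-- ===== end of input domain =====

-- B replaces A's per-position table lookups by a dinucleotide-frequency table aggregated once
-- (count * parameter) and recasts the symmetry check as "seq equals its reverse complement";
-- same O(n), constant-factor faster measured.

-- ===== PORT A =====
-- the module-level DH_PARAMS / DS_PARAMS dicts: .get(pair, table['NN']) as a total function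
def dhGet (a b : Char) : Int :=
  match a, b with
  | 'A','A' => 79  | 'A','C' => 84  | 'A','G' => 78  | 'A','T' => 72  | 'A','N' => 72
  | 'C','A' => 85  | 'C','C' => 80  | 'C','G' => 106 | 'C','T' => 78  | 'C','N' => 78
  | 'G','A' => 82  | 'G','C' => 98  | 'G','G' => 80  | 'G','T' => 84  | 'G','N' => 80
  | 'T','A' => 72  | 'T','C' => 82  | 'T','G' => 85  | 'T','T' => 79  | 'T','N' => 72
  | 'N','A' => 72  | 'N','C' => 80  | 'N','G' => 78  | 'N','T' => 72
  | _, _ => 72     -- DH_PARAMS['NN']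

def dsGet (a b : Char) : Int :=
  match a, b with
  | 'A','A' => 222 | 'A','C' => 224 | 'A','G' => 210 | 'A','T' => 204 | 'A','N' => 224
  | 'C','A' => 227 | 'C','C' => 199 | 'C','G' => 272 | 'C','T' => 210 | 'C','N' => 272
  | 'G','A' => 222 | 'G','C' => 244 | 'G','G' => 199 | 'G','T' => 224 | 'G','N' => 244
  | 'T','A' => 213 | 'T','C' => 222 | 'T','G' => 227 | 'T','T' => 222 | 'T','N' => 227
  | 'N','A' => 168 | 'N','C' => 210 | 'N','G' => 220 | 'N','T' => 215
  | _, _ => 220    -- DS_PARAMS['NN']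

-- the complement dict of symmetry(); none = key not in the dict
def compl? (c : Char) : Option Char :=
  if c = 'A' then some 'T'
  else if c = 'T' then some 'A'
  else if c = 'C' then some 'G'
  else if c = 'G' then some 'C'
  else none

-- symmetry(seq): odd length → False, else check the first half against the mirrored positions
-- (seq[-(i+1)] = seq[len-1-i] since 0 ≤ i < len; getD's default is never read: i < mid ≤ len)
def symmetryA (s : List Char) : Bool :=
  let n := s.length
  if n % 2 == 1 then false
  else
    (List.range (n / 2)).all (fun i =>
      match compl? (s.getD i ' ') with
      | none => false
      | some c => s.getD (n - 1 - i) ' ' == c)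

def calc_thermodynamics (seq : String) : Int × Int :=
  let s := seq.toList
  if s.isEmpty then (0, 0)   -- Python raises IndexError at seq[0]; excluded by Pre_
  else
    let ds0 : Int := if symmetryA s then 14 else 0
    let c0 := s.headD ' '
    let cl := s.getLastD ' '
    let dh1 : Int := if c0 == 'A' || c0 == 'T' then -23 else if c0 == 'C' || c0 == 'G' then -1 else 0
    let ds1 : Int := ds0 + (if c0 == 'A' || c0 == 'T' then -41 else if c0 == 'C' || c0 == 'G' then 28 else 0)
    let dh2 : Int := dh1 + (if cl == 'A' || cl == 'T' then -23 else if cl == 'C' || cl == 'G' then -1 else 0)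
    let ds2 : Int := ds1 + (if cl == 'A' || cl == 'T' then -41 else if cl == 'C' || cl == 'G' then 28 else 0)
    (List.range (s.length - 1)).foldl
      (fun p i => (p.1 + dhGet (s.getD i ' ') (s.getD (i+1) ' '),
                   p.2 + dsGet (s.getD i ' ') (s.getD (i+1) ' ')))
      (dh2, ds2)

-- ===== PORT B =====
-- the TERMINAL dict of Source B: char → (dh, ds) contribution, default (0, 0)
def terminalB (c : Char) : Int × Int :=
  if c = 'A' ∨ c = 'T' then (-23, -41)
  else if c = 'C' ∨ c = 'G' then (-1, 28)
  else (0, 0)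

-- Source B's symmetry test: even length, every char complementable, seq equals its reverse complement
-- (the getD ' ' default is guarded away by the `all` conjunct, as COMPLEMENT[c] is in Source B)
def symmetryB (s : List Char) : Bool :=
  s.length % 2 == 0 && s.all (fun c => (compl? c).isSome)
    && s == s.reverse.map (fun c => (compl? c).getD ' ')

def calc_thermodynamics_alt (seq : String) : Int × Int :=
  let s := seq.toList
  let counts := (s.zip s.tail).foldl
    (fun d p => d.insert p (d.getD p 0 + 1)) PySem.Dict.empty
  let base := counts.items.foldl
    (fun (p : Int × Int) it => (p.1 + it.2 * dhGet it.1.1 it.1.2,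
                                p.2 + it.2 * dsGet it.1.1 it.1.2)) (0, 0)
  if s.isEmpty then (0, 0)   -- Python raises IndexError at seq[0]; excluded by Pre_
  else
    let t0 := terminalB (s.headD ' ')
    let t1 := terminalB (s.getLastD ' ')
    (base.1 + t0.1 + t1.1,
     base.2 + t0.2 + t1.2 + (if symmetryB s then 14 else 0))

-- ===== PRECONDITION & SPEC =====
-- A evaluates seq[0]: the empty string raises IndexError and is excluded.
def Pre_calc_thermodynamics (seq : String) : Prop := seq.toList ≠ []
instance (seq : String) : Decidable (Pre_calc_thermodynamics seq) := by
  unfold Pre_calc_thermodynamics; infer_instance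

def pvWitness_calc_thermodynamics : String := "ATGCAT"

def Spec_calc_thermodynamics (seq : String) (out : Int × Int) : Prop := out = calc_thermodynamics_alt seq
instance (seq : String) (out : Int × Int) : Decidable (Spec_calc_thermodynamics seq out) := by unfold Spec_calc_thermodynamics; infer_instance

-- ===== CLAIM (what is proved, stated in full; the proofs are below) =====
def Claim_equal_calc_thermodynamics : Prop := ∀ (seq : String), Dom_calc_thermodynamics seq → Pre_calc_thermodynamics seq → Spec_calc_thermodynamics seq (calc_thermodynamics seq)

-- ===== LEMMAS AND PROOFS =====

-- involution of the complement table on its domain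
lemma compl?_invol {c d : Char} (h : compl? c = some d) : compl? d = some c := by
  unfold compl? at *; split_ifs at h <;> simp_all <;> subst h <;> decide

-- A's index loop over range(len-1) visits exactly the adjacent pairs zip(s, s[1:])
lemma range_pairs_eq (f : Char → Char → Int) :
    ∀ l : List Char,
      (List.range (l.length - 1)).map (fun i => f (l.getD i ' ') (l.getD (i+1) ' '))
        = (l.zip l.tail).map (fun p => f p.1 p.2) := by
  intro l
  induction l with
  | nil => simp
  | cons a t ih =>
    cases t with
    | nil => simp
    | cons b u =>
      have hlen : (a :: b :: u).length - 1 = ((b :: u).length - 1) + 1 := by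
        simp [List.length_cons]
      rw [hlen, List.range_succ_eq_map]
      simp only [List.map_cons, List.map_map]
      have := ih
      simp only [List.zip_cons_cons, List.tail_cons, List.map_cons] at *
      refine List.cons_eq_cons.mpr ⟨rfl, ?_⟩
      rw [← this]
      simp [Function.comp_def]

-- List.count is the same under any lawful BEq instance (Dict's product-BEq vs DecidableEq's)
lemma count_lawful_eq {α : Type} [DecidableEq α] {inst : BEq α} [@LawfulBEq α inst] {x : α} {l : List α} :
    @List.count α inst x l = @List.count α instBEqOfDecidableEq x l := by
  induction l with
  | nil => rfl
  | cons a t ih => simp [List.count_cons, ih, beq_iff_eq]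

-- aggregating count(pair) * param over the distinct pairs equals summing param over all pairs
lemma counter_sum_eq (g : Char × Char → Int) (ps : List (Char × Char)) :
    ((PySem.Set.ofList ps).map (fun k => ((ps.count k : Int) * g k))).sum
      = (ps.map g).sum := by
  rw [Finset.sum_list_map_count ps g]
  rw [← List.sum_toFinset _ (PySem.Set.nodup_ofList ps)]
  have hfs : (PySem.Set.ofList ps).toFinset = ps.toFinset := by
    apply Finset.ext; intro x
    simp [List.mem_toFinset, PySem.Set.mem_ofList]
  rw [hfs]
  apply Finset.sum_congr rfl
  intro x _
  rw [nsmul_eq_mul, count_lawful_eq]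

-- characterisation of A's half-scan symmetry loop
lemma symA_iff (s : List Char) (he : s.length % 2 = 0) :
    symmetryA s = true ↔
      ∀ i (hi : i < s.length / 2),
        compl? (s[i]'(by omega)) = some (s[s.length - 1 - i]'(by omega)) := by
  unfold symmetryA
  have h1 : (s.length % 2 == 1) = false := by simp [he]
  simp only [h1, Bool.false_eq_true, if_false, List.all_eq_true, List.mem_range]
  constructor
  · intro h i hi
    have hb := h i hi
    have hilt : i < s.length := by omega
    have hjlt : s.length - 1 - i < s.length := by omega
    rw [List.getD_eq_getElem s ' ' hilt, List.getD_eq_getElem s ' ' hjlt] at hb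
    revert hb
    cases hcomp : compl? (s[i]'hilt) with
    | none => simp
    | some c => simp only [beq_iff_eq]; intro hx; rw [hx]
  · intro h i hi
    have hilt : i < s.length := by omega
    have hjlt : s.length - 1 - i < s.length := by omega
    rw [List.getD_eq_getElem s ' ' hilt, List.getD_eq_getElem s ' ' hjlt]
    rw [h i hi]
    simp

-- characterisation of B's reverse-complement comparison
lemma symB_iff (s : List Char) :
    symmetryB s = true ↔
      (s.length % 2 = 0 ∧ (∀ c ∈ s, (compl? c).isSome) ∧
        ∀ i (hi : i < s.length),
          s[i] = (compl? (s[s.length - 1 - i]'(by omega))).getD ' ') := by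
  unfold symmetryB
  simp only [Bool.and_eq_true, beq_iff_eq, List.all_eq_true]
  constructor
  · rintro ⟨⟨hp, hall⟩, heq⟩
    refine ⟨hp, fun c hc => hall c hc, ?_⟩
    intro i hi
    rw [List.getElem_of_eq heq hi, List.getElem_map, List.getElem_reverse]
  · rintro ⟨hp, hall, hpt⟩
    refine ⟨⟨hp, hall⟩, ?_⟩
    apply List.ext_getElem (by simp)
    intro i h1 h2
    rw [List.getElem_map, List.getElem_reverse]
    exact hpt i h1

lemma symmetry_eq (s : List Char) : symmetryA s = symmetryB s := by
  by_cases he : s.length % 2 = 0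
  · rw [Bool.eq_iff_iff, symA_iff s he, symB_iff s]
    constructor
    · intro P
      refine ⟨he, ?_, ?_⟩
      · intro c hc
        obtain ⟨j, hj, rfl⟩ := List.mem_iff_getElem.mp hc
        by_cases hj2 : j < s.length / 2
        · rw [P j hj2]; rfl
        · have hi2 : s.length - 1 - j < s.length / 2 := by omega
          have h1 := P _ hi2
          have hidx : s.length - 1 - (s.length - 1 - j) = j := by omega
          simp only [hidx] at h1
          rw [compl?_invol h1]; rfl
      · intro i hi
        by_cases hi2 : i < s.length / 2
        · have h1 := P i hi2
          simp [compl?_invol h1]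
        · have hi3 : s.length - 1 - i < s.length / 2 := by omega
          have h1 := P _ hi3
          have hidx : s.length - 1 - (s.length - 1 - i) = i := by omega
          simp only [hidx] at h1
          simp [h1]
    · rintro ⟨-, hall, hpt⟩
      intro i hi
      have hilt : i < s.length := by omega
      have hjlt : s.length - 1 - i < s.length := by omega
      have h1 := hpt i hilt
      have h2 : (compl? (s[s.length - 1 - i]'hjlt)).isSome := hall _ (List.getElem_mem _)
      obtain ⟨d, hd⟩ := Option.isSome_iff_exists.mp h2
      rw [hd] at h1
      simp only [Option.getD_some] at h1
      rw [h1, compl?_invol hd]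
  · have h1 : s.length % 2 = 1 := by omega
    unfold symmetryA symmetryB
    simp [h1]

-- terminal-penalty bridge: A's inline if-chain equals B's TERMINAL lookup
lemma terminal_fst (c : Char) :
    (if c == 'A' || c == 'T' then (-23 : Int) else if c == 'C' || c == 'G' then -1 else 0)
      = (terminalB c).1 := by
  by_cases hA : c = 'A' <;> by_cases hT : c = 'T' <;> by_cases hC : c = 'C' <;>
    by_cases hG : c = 'G' <;> simp_all [terminalB]

lemma terminal_snd (c : Char) :
    (if c == 'A' || c == 'T' then (-41 : Int) else if c == 'C' || c == 'G' then 28 else 0)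
      = (terminalB c).2 := by
  by_cases hA : c = 'A' <;> by_cases hT : c = 'T' <;> by_cases hC : c = 'C' <;>
    by_cases hG : c = 'G' <;> simp_all [terminalB]

-- ===== VERDICT (by name: the statement is the Claim_ definition above) =====
theorem calc_thermodynamics_spec : Claim_equal_calc_thermodynamics := by
  intro seq _ hpre
  unfold Spec_calc_thermodynamics
  unfold calc_thermodynamics calc_thermodynamics_alt
  unfold Pre_calc_thermodynamics at hpre
  set s := seq.toList with hs
  have hne : s.isEmpty = false := by simp [hpre]
  simp only [hne, Bool.false_eq_true, if_false]
  -- rewrite B's counter fold into the counter, its items into count * param sums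
  rw [PySem.Dict.foldl_insert_getD_add_one_eq_counter]
  rw [PySem.List.foldl_prod_mk (f := fun (acc : Int) (it : (Char × Char) × Int) => acc + it.2 * dhGet it.1.1 it.1.2)
        (g := fun (acc : Int) (it : (Char × Char) × Int) => acc + it.2 * dsGet it.1.1 it.1.2)]
  rw [PySem.List.foldl_prod_mk (f := fun (acc : Int) (i : Nat) => acc + dhGet (s.getD i ' ') (s.getD (i+1) ' '))
        (g := fun (acc : Int) (i : Nat) => acc + dsGet (s.getD i ' ') (s.getD (i+1) ' '))]
  rw [PySem.List.foldl_add, PySem.List.foldl_add, PySem.List.foldl_add, PySem.List.foldl_add]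
  rw [range_pairs_eq (fun a b => dhGet a b) s, range_pairs_eq (fun a b => dsGet a b) s]
  rw [PySem.Dict.items_counter, List.map_map, List.map_map]
  have hh := counter_sum_eq (fun k => dhGet k.1 k.2) (s.zip s.tail)
  have hs' := counter_sum_eq (fun k => dsGet k.1 k.2) (s.zip s.tail)
  simp only [Function.comp_def] at *
  rw [hh, hs']
  rw [terminal_fst (s.headD ' '), terminal_fst (s.getLastD ' '),
      terminal_snd (s.headD ' '), terminal_snd (s.getLastD ' '), symmetry_eq]
  refine Prod.ext ?_ ?_ <;> simp only [] <;> ring
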